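-- pv_equiv track=rewrite | github.com/monteroluca007/tup26-p3 | scripts/corregir_tp1_sortx.py | _estado_y_pruebas
-- ===== SOURCE A (Python) =====
-- def _estado_y_pruebas(resultado: str) -> tuple[str, list[str]]:
--     estado = resultado.split()[0]
--
--     if estado == "funciona":
--         return "🟢", ["✅"] * 6
--     if estado == "no-compila":
--         return "🟡", ["-"] * 6
--     if estado == "no-presentado":
--         return "🔴", ["-"] * 6
--
--     fallas = {int(valor) for valor in resultado.split()[1:] if valor.isdigit()}
--     pruebas = ["❌" if indice in fallas else "✅" for indice in range(1, 7)]
--     return "🔵", pruebas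
-- ===== SOURCE B (Python) =====
-- _ESPECIALES = {
--     "funciona": ("🟢", "✅"),
--     "no-compila": ("🟡", "-"),
--     "no-presentado": ("🔴", "-"),
-- }
--
--
-- def _estado_y_pruebas(resultado: str) -> tuple[str, list[str]]:
--     estado, *resto = resultado.split()
--
--     especial = _ESPECIALES.get(estado)
--     if especial is not None:
--         emoji, marca = especial
--         return emoji, [marca] * 6
--
--     pruebas = ["✅"] * 6
--     for tok in resto:
--         if tok.isdigit():
--             v = int(tok)
--             if 1 <= v <= 6:
--                 pruebas[v - 1] = "❌"
--     return "🔵", pruebas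
-- ===== Notes on version B (the rewrite author's own statement) =====
-- stated objective: alternative
-- what changed: B destructures the token list (head + rest, no indexing/slicing), replaces the early-return chain by one lookup in a status table of (emoji, mark) pairs, and in the default case scatters over the rest tokens (overwriting position v-1 for each in-range digit) instead of gathering a set of failures and testing membership over range(1,7).
import Mathlib
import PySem

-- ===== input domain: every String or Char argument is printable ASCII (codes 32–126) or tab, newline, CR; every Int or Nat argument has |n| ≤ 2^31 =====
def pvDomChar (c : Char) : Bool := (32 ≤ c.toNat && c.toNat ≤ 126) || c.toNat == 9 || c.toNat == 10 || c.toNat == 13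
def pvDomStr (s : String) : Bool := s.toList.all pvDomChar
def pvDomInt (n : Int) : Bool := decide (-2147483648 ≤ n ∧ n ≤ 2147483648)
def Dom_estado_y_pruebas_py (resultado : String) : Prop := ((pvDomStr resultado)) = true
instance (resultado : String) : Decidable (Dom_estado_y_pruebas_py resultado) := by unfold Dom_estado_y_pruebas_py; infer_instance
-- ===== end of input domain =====

-- B destructures the token list, replaces the early-return chain by one lookup in a
-- status table, and scatters over the rest tokens instead of gathering a failure set.

-- ===== PORT A =====
def estado_y_pruebas_py (resultado : String) : String × List String :=
  match PySem.List.pyGet? (PySem.Str.split₀ resultado) 0 with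
  | none => ("", [])   -- IndexError on whitespace-only input; excluded by Pre_
  | some estado =>
    if estado = "funciona" then ("🟢", List.replicate 6 "✅")
    else if estado = "no-compila" then ("🟡", List.replicate 6 "-")
    else if estado = "no-presentado" then ("🔴", List.replicate 6 "-")
    else
      -- set comprehension over resultado.split()[1:]; int(valor) never raises on an
      -- isdigit ASCII token, so (ofStr? _).getD 0 is exact there
      let fallas : PySem.Set Int :=
        (PySem.List.slice (PySem.Str.split₀ resultado) (some 1) none).foldl
          (fun s v => if PySem.Str.strIsdigit v then PySem.Set.add s ((PySem.Int.ofStr? v).getD 0) else s)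
          PySem.Set.empty
      ("🔵", (PySem.List.pyRange 1 7 1).map (fun i => if PySem.Set.contains fallas i then "❌" else "✅"))

-- ===== PORT B =====
-- the module-level _ESPECIALES dict of Source B
def pvEspeciales : PySem.Dict String (String × String) :=
  PySem.Dict.ofList
    [("funciona", ("🟢", "✅")), ("no-compila", ("🟡", "-")), ("no-presentado", ("🔴", "-"))]

def estado_y_pruebas_py_alt (resultado : String) : String × List String :=
  match PySem.Str.split₀ resultado with
  | [] => ("", [])   -- 'estado, *resto = []' raises ValueError; excluded by Pre_
  | estado :: resto =>
    match PySem.Dict.get? pvEspeciales estado with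
    | some (emoji, marca) => (emoji, List.replicate 6 marca)
    | none =>
      let pruebas := resto.foldl
        (fun pr tok =>
          if PySem.Str.strIsdigit tok then
            let v := (PySem.Int.ofStr? tok).getD 0   -- int(tok); exact: tok.isdigit()
            if 1 ≤ v ∧ v ≤ 6 then PySem.List.pySetD pr (v - 1) "❌" else pr
          else pr)
        (List.replicate 6 "✅")
      ("🔵", pruebas)

-- ===== PRECONDITION & SPEC =====
-- Pre_ excludes exactly the whitespace-only strings, on which A's resultado.split()[0] raises IndexError.
def Pre_estado_y_pruebas_py (resultado : String) : Prop := PySem.Str.split₀ resultado ≠ []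
instance (resultado : String) : Decidable (Pre_estado_y_pruebas_py resultado) := by unfold Pre_estado_y_pruebas_py; infer_instance
def pvWitness_estado_y_pruebas_py : String := "falla 1 3"

def Spec_estado_y_pruebas_py (resultado : String) (out : String × List String) : Prop := out = estado_y_pruebas_py_alt resultado
instance (resultado : String) (out : String × List String) : Decidable (Spec_estado_y_pruebas_py resultado out) := by unfold Spec_estado_y_pruebas_py; infer_instance

-- ===== CLAIM =====
def Claim_equal_estado_y_pruebas_py : Prop := ∀ (resultado : String), Dom_estado_y_pruebas_py resultado → Pre_estado_y_pruebas_py resultado → Spec_estado_y_pruebas_py resultado (estado_y_pruebas_py resultado)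

-- ===== LEMMAS AND PROOFS =====

-- the six-entry status list built from a failure set
def pvMark (s : PySem.Set Int) : List String :=
  (PySem.List.pyRange 1 7 1).map (fun i => if PySem.Set.contains s i then "❌" else "✅")

theorem pvRange16 : PySem.List.pyRange 1 7 1 = [1, 2, 3, 4, 5, 6] := by decide

-- one token's effect: setting position v-1 (when 1 ≤ v ≤ 6) equals adding v to the failure set
theorem pvStep (s : PySem.Set Int) (v : Int) :
    (if 1 ≤ v ∧ v ≤ 6 then PySem.List.pySetD (pvMark s) (v - 1) "❌" else pvMark s)
      = pvMark (PySem.Set.add s v) := by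
  by_cases h : 1 ≤ v ∧ v ≤ 6
  · obtain ⟨h1, h2⟩ := h
    rw [if_pos ⟨h1, h2⟩]
    unfold pvMark
    rw [pvRange16]
    interval_cases v <;> simp [PySem.List.pySetD_of_nonneg, List.set]
  · rw [if_neg h]
    unfold pvMark
    rw [pvRange16]
    have h1 : (1 : Int) ≠ v := by omega
    have h2 : (2 : Int) ≠ v := by omega
    have h3 : (3 : Int) ≠ v := by omega
    have h4 : (4 : Int) ≠ v := by omega
    have h5 : (5 : Int) ≠ v := by omega
    have h6 : (6 : Int) ≠ v := by omega
    simp [h1, h2, h3, h4, h5, h6]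

-- loop invariant: B's scatter fold over the tokens tracks A's gathered set
theorem pvLoop (ts : List String) (s : PySem.Set Int) :
    ts.foldl
        (fun pr tok =>
          if PySem.Str.strIsdigit tok then
            let v := (PySem.Int.ofStr? tok).getD 0
            if 1 ≤ v ∧ v ≤ 6 then PySem.List.pySetD pr (v - 1) "❌" else pr
          else pr)
        (pvMark s)
      = pvMark (ts.foldl
          (fun s v => if PySem.Str.strIsdigit v then PySem.Set.add s ((PySem.Int.ofStr? v).getD 0) else s)
          s) := by
  induction ts generalizing s with
  | nil => rfl
  | cons t ts ih =>
    by_cases h : PySem.Str.strIsdigit t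
    · simp only [List.foldl_cons, h, if_pos, pvStep s ((PySem.Int.ofStr? t).getD 0)]
      exact ih _
    · simp only [List.foldl_cons, h, Bool.false_eq_true, ite_false]
      exact ih s

theorem pvMark_empty : pvMark PySem.Set.empty = List.replicate 6 "✅" := by decide

-- table lookup agrees with A's early-return chain on every estado
theorem pvLookup (estado : String) :
    PySem.Dict.get? pvEspeciales estado
      = (if estado = "funciona" then some ("🟢", "✅")
         else if estado = "no-compila" then some ("🟡", "-")
         else if estado = "no-presentado" then some ("🔴", "-")
         else none) := by
  by_cases h1 : estado = "funciona"
  · subst h1; decide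
  by_cases h2 : estado = "no-compila"
  · subst h2; decide
  by_cases h3 : estado = "no-presentado"
  · subst h3; decide
  rw [if_neg h1, if_neg h2, if_neg h3]
  have hlit : pvEspeciales
      = PySem.Dict.mk [("funciona", ("🟢", "✅")), ("no-compila", ("🟡", "-")), ("no-presentado", ("🔴", "-"))] := by
    decide
  rw [hlit]
  simp only [PySem.Dict.get?_mk_cons, beq_iff_eq]
  rw [if_neg (fun h => h1 h.symm), if_neg (fun h => h2 h.symm), if_neg (fun h => h3 h.symm)]
  rfl

-- ===== VERDICT =====
theorem estado_y_pruebas_py_spec : Claim_equal_estado_y_pruebas_py := by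
  intro resultado _ hpre
  unfold Spec_estado_y_pruebas_py estado_y_pruebas_py estado_y_pruebas_py_alt
  cases hsp : PySem.Str.split₀ resultado with
  | nil => exact absurd hsp hpre
  | cons estado resto =>
    dsimp only
    rw [PySem.List.pyGet?_zero_cons, PySem.List.slice_from_one]
    dsimp only [List.tail_cons]
    rw [pvLookup estado]
    split_ifs <;> try rfl
    rw [← pvMark_empty, pvLoop]
    rfl
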